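-- pv_equiv track=rewrite | github.com/woodandwire/ChordMaker | src/position_finder.py | assign_fingers_to_pattern
-- ===== SOURCE A (Python) =====
-- import itertools
-- from typing import List, Tuple, Dict, Any, Optional
--
-- def assign_fingers_to_pattern(base_pattern: List[Tuple[str, int]]) -> List[List[Tuple[str, int]]]:
--     """
--     Assign fingers to fretted strings in a pattern.
--
--     Works from string 6 to 1, assigning fingers (1, 2, 3, 4, T) to each fretted string.
--     Allows finger repetition to enable barre chords and other multi-string techniques.
--
--     Args:
--         base_pattern: Pattern with FRET placeholders
--
--     Returns:
--         List of complete patterns with finger assignments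
--     """
--     # Find fretted string positions
--     fretted_positions = []
--     for i, (indicator, fret) in enumerate(base_pattern):
--         if indicator == 'FRET':
--             fretted_positions.append(i)
--
--     if not fretted_positions:
--         # No fretted strings - return the pattern as-is (all open/muted)
--         return [base_pattern]
--
--     # Available fingers for fretting (excluding O and X)
--     available_fingers = ['1', '2', '3', '4', 'T']
--
--     patterns = []
--
--     # Generate all possible finger assignments for fretted positions
--     # Use itertools.product to allow finger repetition (enables barre chords)
--     # Limit combinations to reasonable finger counts (max 4 fretted strings for performance)
--     if len(fretted_positions) <= 4:
--         # Use product instead of permutations to allow repeated fingers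
--         for finger_combo in itertools.product(available_fingers, repeat=len(fretted_positions)):
--             pattern = base_pattern.copy()
--
--             # Assign fingers to fretted positions
--             for pos_index, string_index in enumerate(fretted_positions):
--                 finger = finger_combo[pos_index]
--                 fret = pattern[string_index][1]
--                 pattern[string_index] = (finger, fret)
--
--             patterns.append(pattern)
--
--     return patterns
-- ===== SOURCE B (Python) =====
-- def assign_fingers_to_pattern(base_pattern):
--     fretted_positions = [i for i, (indicator, _fret) in enumerate(base_pattern)
--                          if indicator == 'FRET']
--     if len(fretted_positions) > 4:
--         return []
--     # Worklist expansion: outer over existing partial patterns, inner over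
--     # fingers, so the last fretted position varies fastest (product order).
--     work = [base_pattern]
--     for idx in fretted_positions:
--         new_work = []
--         for pattern in work:
--             for finger in ['1', '2', '3', '4', 'T']:
--                 expanded = pattern.copy()
--                 expanded[idx] = (finger, expanded[idx][1])
--                 new_work.append(expanded)
--         work = new_work
--     return work
-- ===== Notes on version B (the rewrite author's own statement) =====
-- stated objective: alternative
-- what changed: Replaces itertools.product plus a per-combo assignment loop by incremental worklist expansion: one pass over the fretted positions, each step expanding every partial pattern by the five fingers, so complete patterns are built directly without materialising finger tuples.
import Mathlib
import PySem

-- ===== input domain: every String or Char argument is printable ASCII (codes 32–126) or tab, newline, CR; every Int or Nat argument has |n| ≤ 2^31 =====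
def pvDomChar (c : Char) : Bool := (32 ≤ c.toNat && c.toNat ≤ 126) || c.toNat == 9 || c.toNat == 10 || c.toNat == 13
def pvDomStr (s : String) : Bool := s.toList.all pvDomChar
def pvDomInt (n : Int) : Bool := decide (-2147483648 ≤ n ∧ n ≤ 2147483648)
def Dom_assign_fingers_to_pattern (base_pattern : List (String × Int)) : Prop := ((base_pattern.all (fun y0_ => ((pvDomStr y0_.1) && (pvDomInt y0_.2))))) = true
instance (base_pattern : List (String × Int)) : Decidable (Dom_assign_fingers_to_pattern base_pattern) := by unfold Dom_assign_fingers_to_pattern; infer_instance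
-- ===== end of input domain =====

-- B changes the decomposition only (worklist expansion instead of itertools.product); same output, same cost.

-- ===== PORT A =====
-- fretted positions: indices i with base_pattern[i].1 == "FRET" (Python's enumerate loop)
def pvFretted (base_pattern : List (String × Int)) : List Int :=
  (PySem.List.enumerate base_pattern).foldl
    (fun acc (p : Int × (String × Int)) => if p.2.1 == "FRET" then acc ++ [p.1] else acc) []

-- itertools.product(fingers, repeat=n), first coordinate varying slowest
def pvProduct (fingers : List String) : Nat → List (List String)
  | 0 => [[]]
  | n + 1 => fingers.flatMap (fun f => (pvProduct fingers n).map (f :: ·))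

-- the inner assignment loop: for pos_index, string_index in enumerate(fretted_positions)
-- (finger_combo[pos_index] is read via the zip of the combo with the positions; lengths agree by construction)
def pvAssign (pat : List (String × Int)) (combo : List String) (positions : List Int) :
    List (String × Int) :=
  (combo.zip positions).foldl
    (fun pat (fi : String × Int) =>
      PySem.List.pySetD pat fi.2 (fi.1, (PySem.List.pyGetD pat fi.2 ("", 0)).2)) pat

def assign_fingers_to_pattern (base_pattern : List (String × Int)) : List (List (String × Int)) :=
  let fretted_positions := pvFretted base_pattern
  if fretted_positions = [] then [base_pattern]
  else
    let available_fingers := ["1", "2", "3", "4", "T"]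
    if fretted_positions.length ≤ 4 then
      (pvProduct available_fingers fretted_positions.length).foldl
        (fun patterns combo => patterns ++ [pvAssign base_pattern combo fretted_positions]) []
    else []

-- ===== PORT B =====
-- B's list comprehension: [i for i, (indicator, _fret) in enumerate(base_pattern) if indicator == 'FRET']
def pvFrettedB (base_pattern : List (String × Int)) : List Int :=
  (PySem.List.enumerate base_pattern).filterMap
    (fun (p : Int × (String × Int)) => if p.2.1 == "FRET" then some p.1 else none)

-- expand one partial pattern at string index idx by one finger
def pvExpand1 (idx : Int) (pat : List (String × Int)) (finger : String) : List (String × Int) :=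
  PySem.List.pySetD pat idx (finger, (PySem.List.pyGetD pat idx ("", 0)).2)

-- the worklist loop: for idx in fretted_positions: work = [expand p by each finger for p in work]
def pvWork (work : List (List (String × Int))) (positions : List Int) :
    List (List (String × Int)) :=
  positions.foldl
    (fun work idx => work.flatMap (fun pat => ["1", "2", "3", "4", "T"].map (pvExpand1 idx pat)))
    work

def assign_fingers_to_pattern_alt (base_pattern : List (String × Int)) :
    List (List (String × Int)) :=
  let fretted_positions := pvFrettedB base_pattern
  if fretted_positions.length > 4 then []
  else pvWork [base_pattern] fretted_positions

-- ===== PRECONDITION & SPEC =====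
def Spec_assign_fingers_to_pattern (base_pattern : List (String × Int)) (out : List (List (String × Int))) : Prop := out = assign_fingers_to_pattern_alt base_pattern
instance (base_pattern : List (String × Int)) (out : List (List (String × Int))) : Decidable (Spec_assign_fingers_to_pattern base_pattern out) := by unfold Spec_assign_fingers_to_pattern; infer_instance

-- ===== CLAIM (what is proved, stated in full; the proofs are below) =====
def Claim_equal_assign_fingers_to_pattern : Prop := ∀ (base_pattern : List (String × Int)), Dom_assign_fingers_to_pattern base_pattern → Spec_assign_fingers_to_pattern base_pattern (assign_fingers_to_pattern base_pattern)

-- ===== LEMMAS AND PROOFS =====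

-- the worklist step distributes over appends of worklists
theorem pvWork_append (positions : List Int) (w1 w2 : List (List (String × Int))) :
    pvWork (w1 ++ w2) positions = pvWork w1 positions ++ pvWork w2 positions := by
  induction positions generalizing w1 w2 with
  | nil => simp [pvWork]
  | cons i rest ih =>
      simp only [pvWork, List.foldl_cons, List.flatMap_append] at *
      exact ih _ _

-- expanding a mapped worklist = flatMap of singleton worklists
theorem pvWork_map (positions : List Int) (l : List String)
    (h : String → List (String × Int)) :
    pvWork (l.map h) positions = l.flatMap (fun f => pvWork [h f] positions) := by
  induction l with
  | nil => induction positions with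
    | nil => rfl
    | cons i rest ih => simpa [pvWork] using ih
  | cons a l ih =>
      have : (a :: l).map h = [h a] ++ l.map h := by simp
      rw [this, pvWork_append, ih]
      simp

theorem pvAssign_cons (pat : List (String × Int)) (f : String) (c : List String)
    (i : Int) (rest : List Int) :
    pvAssign pat (f :: c) (i :: rest) = pvAssign (pvExpand1 i pat f) c rest := by
  simp [pvAssign, pvExpand1]

-- main bridge: mapping pvAssign over the product = worklist expansion from one seed
theorem product_eq_work (positions : List Int) (pat : List (String × Int)) :
    (pvProduct ["1", "2", "3", "4", "T"] positions.length).map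
      (fun c => pvAssign pat c positions) = pvWork [pat] positions := by
  induction positions generalizing pat with
  | nil => rfl
  | cons i rest ih =>
      have step : pvWork [pat] (i :: rest)
          = pvWork (["1", "2", "3", "4", "T"].map (pvExpand1 i pat)) rest := by
        simp [pvWork]
      rw [step, pvWork_map]
      simp only [List.length_cons, pvProduct, List.map_flatMap, List.map_map]
      refine List.flatMap_congr (fun f _ => ?_)
      rw [← ih (pvExpand1 i pat f)]
      refine List.map_congr_left (fun c _ => ?_)
      simp [Function.comp, pvAssign_cons]

-- the two position computations agree
theorem pvFretted_eq (bp : List (String × Int)) : pvFretted bp = pvFrettedB bp := by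
  unfold pvFretted pvFrettedB
  rw [PySem.List.foldl_append_if (l := PySem.List.enumerate bp)
    (p := fun (p : Int × (String × Int)) => p.2.1 == "FRET") (f := Prod.fst) (acc := [])]
  simp only [List.nil_append]
  induction PySem.List.enumerate bp with
  | nil => rfl
  | cons p l ih => by_cases h : p.2.1 == "FRET" <;> simp_all

-- A's appending foldl is just a map over the product list
theorem foldl_append_assign (l : List (List String)) (pat : List (String × Int))
    (positions : List Int) (acc : List (List (String × Int))) :
    l.foldl (fun patterns combo => patterns ++ [pvAssign pat combo positions]) acc
      = acc ++ l.map (fun c => pvAssign pat c positions) := by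
  simpa using PySem.List.foldl_append_singleton_eq_map (f := fun c => pvAssign pat c positions) l acc

-- ===== VERDICT (by name: the statement is the Claim_ definition above) =====
theorem assign_fingers_to_pattern_spec : Claim_equal_assign_fingers_to_pattern := by
  intro bp _
  show _ = _
  unfold assign_fingers_to_pattern assign_fingers_to_pattern_alt
  rw [← pvFretted_eq]
  by_cases hnil : pvFretted bp = []
  · simp [hnil, pvWork]
  · simp only [hnil, if_false]
    by_cases hlen : (pvFretted bp).length ≤ 4
    · have : ¬ (pvFretted bp).length > 4 := by omega
      simp only [hlen, if_true, this, if_false]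
      rw [foldl_append_assign, List.nil_append, product_eq_work]
    · have : (pvFretted bp).length > 4 := by omega
      simp [hlen, this]
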